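-- pv_equiv track=rewrite | github.com/Romancikh/Vuzovec_bot | app/data_processor.py | get_pass
-- ===== SOURCE A (Python) =====
-- def get_pass(search_date: list, data: dict, call_data: str):
--     result_message = ""
--     if call_data == "today":
--         result_message += "Прохождений за сегодня: "
--     elif call_data == "month":
--         result_message += "Прохождений за месяц: "
--     else:
--         if len(search_date) == 1:
--             date_text = str(search_date[0]).replace("-", ".")
--         else:
--             date_text = str(search_date[0]).replace("-", ".") + "-" + str(search_date[-1]).replace("-", ".")
--         result_message += "Прохождений за " + date_text + ": "
--     pass_count = 0
--     for user in data.keys():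
--         for i in data.get(user):
--             if i in search_date:
--                 pass_count += 1
--     result_message += str(pass_count)
--     return result_message
-- ===== SOURCE B (Python) =====
-- def get_pass(search_date: list, data: dict, call_data: str):
--     if call_data == "today":
--         result_message = "Прохождений за сегодня: "
--     elif call_data == "month":
--         result_message = "Прохождений за месяц: "
--     else:
--         if len(search_date) == 1:
--             date_text = str(search_date[0]).replace("-", ".")
--         else:
--             date_text = str(search_date[0]).replace("-", ".") + "-" + str(search_date[-1]).replace("-", ".")
--         result_message = "Прохождений за " + date_text + ": "
--     freq = {}
--     for entries in data.values():
--         for e in entries: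
--             freq[e] = freq.get(e, 0) + 1
--     pass_count = sum(freq.get(d, 0) for d in set(search_date))
--     return result_message + str(pass_count)
-- ===== Notes on version B (the rewrite author's own statement) =====
-- stated objective: faster
-- what changed: Instead of testing every entry of every user against the search_date list, B builds a frequency table of all entries in one pass over data.values() and then sums the table entries for the distinct search dates, replacing the per-entry membership scan by per-date lookups.
import Mathlib
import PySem

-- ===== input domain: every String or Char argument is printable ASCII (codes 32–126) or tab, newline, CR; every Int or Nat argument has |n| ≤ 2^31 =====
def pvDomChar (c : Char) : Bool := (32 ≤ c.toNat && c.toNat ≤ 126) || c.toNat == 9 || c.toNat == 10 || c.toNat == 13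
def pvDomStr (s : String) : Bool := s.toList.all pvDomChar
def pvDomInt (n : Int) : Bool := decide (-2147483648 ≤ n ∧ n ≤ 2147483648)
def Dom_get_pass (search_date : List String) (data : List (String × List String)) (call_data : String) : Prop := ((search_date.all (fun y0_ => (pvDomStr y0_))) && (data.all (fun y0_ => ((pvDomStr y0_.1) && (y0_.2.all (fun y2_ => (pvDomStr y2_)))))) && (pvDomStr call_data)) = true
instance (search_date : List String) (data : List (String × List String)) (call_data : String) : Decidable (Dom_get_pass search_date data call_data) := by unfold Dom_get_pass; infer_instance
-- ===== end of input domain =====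

-- B replaces A's per-entry membership scan over search_date by a frequency dict of all
-- entries built once, then summed over the distinct search dates (objective: faster).

-- ===== PORT A =====
-- the message prefix, shared text of both Pythons
def pvPrefix (search_date : List String) (call_data : String) : String :=
  if call_data == "today" then "Прохождений за сегодня: "
  else if call_data == "month" then "Прохождений за месяц: "
  else
    let date_text :=
      if search_date.length == 1 then
        PySem.Str.replace (PySem.List.pyGetD search_date 0 "") "-" "."
      else
        PySem.Str.replace (PySem.List.pyGetD search_date 0 "") "-" "." ++ "-" ++
          PySem.Str.replace (PySem.List.pyGetD search_date (-1) "") "-" "."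
    "Прохождений за " ++ date_text ++ ": "

-- 'for user in data.keys(): for i in data.get(user)' iterates the (unique-keyed) dict's
-- pairs in order with each pair's own value: exact as the fold over the items list.
def get_pass (search_date : List String) (data : List (String × List String)) (call_data : String) : String :=
  let result_message := pvPrefix search_date call_data
  let pass_count : Int := data.foldl (fun acc user =>
      user.2.foldl (fun acc i => if search_date.contains i then acc + 1 else acc) acc) 0
  result_message ++ PySem.Int.toStr pass_count

-- ===== PORT B =====
def get_pass_alt (search_date : List String) (data : List (String × List String)) (call_data : String) : String :=
  let result_message := pvPrefix search_date call_data
  let freq := (data.map Prod.snd).foldl (fun d entries =>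
      entries.foldl (fun d e => PySem.Dict.insert d e (PySem.Dict.getD d e 0 + 1)) d) PySem.Dict.empty
  let pass_count : Int := (PySem.Set.ofList search_date).foldl
      (fun acc dte => acc + PySem.Dict.getD freq dte 0) 0
  result_message ++ PySem.Int.toStr pass_count

-- ===== PRECONDITION & SPEC =====
-- Pre_ excludes only the inputs on which both Pythons raise IndexError: call_data other
-- than "today"/"month" with an empty search_date (search_date[0] fails).
def Pre_get_pass (search_date : List String) (data : List (String × List String)) (call_data : String) : Prop :=
  call_data = "today" ∨ call_data = "month" ∨ search_date ≠ []
instance (search_date : List String) (data : List (String × List String)) (call_data : String) : Decidable (Pre_get_pass search_date data call_data) := by unfold Pre_get_pass; infer_instance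
def pvWitness_get_pass : List String × (List (String × List String)) × String :=
  (["2024-01-02"], [("u", ["2024-01-02", "2024-01-03"]), ("v", ["2024-01-02"])], "dates")

def Spec_get_pass (search_date : List String) (data : List (String × List String)) (call_data : String) (out : String) : Prop := out = get_pass_alt search_date data call_data
instance (search_date : List String) (data : List (String × List String)) (call_data : String) (out : String) : Decidable (Spec_get_pass search_date data call_data out) := by unfold Spec_get_pass; infer_instance

-- ===== CLAIM (what is proved, stated in full; the proofs are below) =====
def Claim_equal_get_pass : Prop := ∀ (search_date : List String) (data : List (String × List String)) (call_data : String), Dom_get_pass search_date data call_data → Pre_get_pass search_date data call_data → Spec_get_pass search_date data call_data (get_pass search_date data call_data)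

-- ===== LEMMAS AND PROOFS =====

-- the frequency dict of a list of lists counts occurrences in the flattened list
theorem pv_freq_getD (L : List (List String)) (d : PySem.Dict String Int) (v : String) :
    (L.foldl (fun d entries =>
        entries.foldl (fun d e => PySem.Dict.insert d e (PySem.Dict.getD d e 0 + 1)) d) d).getD v 0
      = d.getD v 0 + L.flatten.count v := by
  induction L generalizing d with
  | nil => simp
  | cons h t ih =>
    simp only [List.foldl_cons, ih, PySem.Dict.getD_foldl_insert_add_one, List.flatten_cons,
      List.count_append]
    push_cast
    ring

-- summing a 0/1 indicator over a duplicate-free list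
theorem pv_sum_indicator (s : List String) (hs : s.Nodup) (a : String) :
    (s.map (fun d => if d == a then (1 : Int) else 0)).sum = if a ∈ s then 1 else 0 := by
  induction s with
  | nil => simp
  | cons h t ih =>
    simp only [List.nodup_cons] at hs
    simp only [List.map_cons, List.sum_cons, ih hs.2, List.mem_cons]
    by_cases hha : h = a
    · subst hha
      simp [hs.1]
    · simp [beq_iff_eq, hha, Ne.symm hha]

-- summing per-date counts over the distinct dates = counting entries that match some date
theorem pv_sum_counts (sd : List String) (all : List String) (s : List String)
    (hnd : s.Nodup) (hmem : ∀ x, x ∈ s ↔ x ∈ sd) :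
    (s.map (fun d => (all.count d : Int))).sum = (all.countP (fun i => sd.contains i) : Int) := by
  induction all with
  | nil => simp
  | cons a t ih =>
    have hcnt : ∀ d, ((a :: t).count d : Int) = (t.count d : Int) + (if d == a then 1 else 0) := by
      intro d
      by_cases h : d = a
      · simp [h]
      · simp [h, Ne.symm h]
    have hsplit : (s.map (fun d => ((a :: t).count d : Int))).sum
        = (s.map (fun d => (t.count d : Int))).sum
          + (s.map (fun d => if d == a then (1 : Int) else 0)).sum := by
      rw [← List.sum_map_add]
      exact List.map_congr_left (fun d _ => hcnt d) ▸ rfl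
    rw [hsplit, ih, pv_sum_indicator s hnd a, List.countP_cons]
    by_cases hmem' : a ∈ sd
    · simp [hmem, hmem']
    · simp [hmem, hmem']

-- A's nested counting loop counts the matching entries of the flattened values
theorem pv_a_count (sd : List String) (data : List (String × List String)) (a : Int) :
    data.foldl (fun acc user =>
        user.2.foldl (fun acc i => if sd.contains i then acc + 1 else acc) acc) a
      = a + ((data.map Prod.snd).flatten.countP (fun i => sd.contains i) : Int) := by
  induction data generalizing a with
  | nil => simp
  | cons h t ih =>
    simp only [List.foldl_cons, List.map_cons, List.flatten_cons, List.countP_append]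
    rw [PySem.List.foldl_if_add_one, ih]
    push_cast
    ring

-- ===== VERDICT (by name: the statement is the Claim_ definition above) =====
theorem get_pass_spec : Claim_equal_get_pass := by
  intro sd data cd _ _
  unfold Spec_get_pass get_pass get_pass_alt
  simp only []
  congr 1
  -- counts agree
  rw [pv_a_count sd data 0]
  rw [PySem.List.foldl_add]
  have hfreq : ∀ v, ((data.map Prod.snd).foldl (fun d entries =>
      entries.foldl (fun d e => PySem.Dict.insert d e (PySem.Dict.getD d e 0 + 1)) d)
        PySem.Dict.empty).getD v 0 = ((data.map Prod.snd).flatten.count v : Int) := by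
    intro v; rw [pv_freq_getD]; simp
  have hmap : (PySem.Set.ofList sd).map (fun dte => ((data.map Prod.snd).foldl (fun d entries =>
      entries.foldl (fun d e => PySem.Dict.insert d e (PySem.Dict.getD d e 0 + 1)) d)
        PySem.Dict.empty).getD dte 0)
      = (PySem.Set.ofList sd).map (fun dte => ((data.map Prod.snd).flatten.count dte : Int)) :=
    List.map_congr_left (fun d _ => hfreq d)
  rw [hmap, pv_sum_counts sd _ _ (PySem.Set.nodup_ofList sd)
    (fun x => PySem.Set.mem_ofList sd x)]
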